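-- pv_equiv track=rewrite | github.com/JustinChu/ntsm | ntsm-scripts/extractSNPsfromVCF.py | _encodeKmer
-- ===== SOURCE A (Python) =====
-- def _encodeKmer(kmer):
--     fw_encode = {'A': 0, 'T': 1, 'C': 2, 'G': 3}
--     rv_encode = {'A': 1, 'T': 0, 'C': 3, 'G': 2}
--     fw = 0
--     rv = 0
--
--     for base in kmer:
--         fw = (fw << 2) | fw_encode[base]
--
--     for base in reversed(kmer):
--         rv = (rv << 2) | rv_encode[base]
--
--     if(fw < rv):
--         return fw
--     else:
--         return rv
-- ===== SOURCE B (Python) =====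
-- def _encodeKmer(kmer):
--     code = {'A': 0, 'T': 1, 'C': 2, 'G': 3}
--     # forward value: walk the bases back-to-front, OR-ing each code in at its place value
--     fw = 0
--     shift = 0
--     for base in reversed(kmer):
--         fw |= code[base] << shift
--         shift += 2
--     # reverse complement: reverse and complement fw's 2-bit groups, never re-reading the string
--     rv = 0
--     for i in range(0, shift, 2):
--         rv = (rv << 2) | (((fw >> i) & 3) ^ 1)
--     return min(fw, rv)
-- ===== Notes on version B (the rewrite author's own statement) =====
-- stated objective: alternative
-- what changed: B builds fw by walking the bases back-to-front and OR-ing each 2-bit code in at its place value (no Horner shift-accumulate and no second lookup table), then derives the reverse-complement encoding rv by reversing and complementing fw's 2-bit groups with shift/mask/xor instead of re-scanning the string, returning min(fw, rv).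
import Mathlib
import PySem

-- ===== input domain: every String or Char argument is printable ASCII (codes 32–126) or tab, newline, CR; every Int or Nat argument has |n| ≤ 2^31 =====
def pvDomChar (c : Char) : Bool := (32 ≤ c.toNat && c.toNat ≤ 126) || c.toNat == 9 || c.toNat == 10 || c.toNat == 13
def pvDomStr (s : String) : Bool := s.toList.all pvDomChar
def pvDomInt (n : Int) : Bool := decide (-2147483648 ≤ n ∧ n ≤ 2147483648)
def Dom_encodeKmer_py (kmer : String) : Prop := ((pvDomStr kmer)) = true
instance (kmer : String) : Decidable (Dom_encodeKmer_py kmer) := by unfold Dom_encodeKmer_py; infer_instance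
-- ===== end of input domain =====

-- B walks the bases back-to-front OR-ing each code in at its place value (one table, no
-- Horner re-scan), then derives the reverse complement from fw's 2-bit groups (alternative).


-- ===== PORT A =====
-- fw_encode[base] / rv_encode[base] raise KeyError outside the four DNA bases; Pre_ excludes
-- those inputs, so the total getD _ 0 is exact on the admitted domain.
def encodeKmer_py (kmer : String) : Int :=
  let fw_encode : PySem.Dict Char Int := PySem.Dict.ofList [('A', 0), ('T', 1), ('C', 2), ('G', 3)]
  let rv_encode : PySem.Dict Char Int := PySem.Dict.ofList [('A', 1), ('T', 0), ('C', 3), ('G', 2)]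
  let fw := kmer.toList.foldl (fun fw base => PySem.Int.bor (fw <<< (2 : Nat)) (fw_encode.getD base 0)) 0
  let rv := kmer.toList.reverse.foldl (fun rv base => PySem.Int.bor (rv <<< (2 : Nat)) (rv_encode.getD base 0)) 0
  if fw < rv then fw else rv

-- ===== PORT B =====
-- fw is built back-to-front: each code is OR-ed in at its place value (fw |= code << shift);
-- rv reverses and complements fw's 2-bit groups via range(0, shift, 2): (rv<<2)|(((fw>>i)&3)^1).
-- st.2.toNat is exact: shift starts at 0 and only ever grows by 2, so it is never negative.
def encodeKmer_py_alt (kmer : String) : Int :=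
  let code : PySem.Dict Char Int := PySem.Dict.ofList [('A', 0), ('T', 1), ('C', 2), ('G', 3)]
  let st := kmer.toList.reverse.foldl
    (fun (st : Int × Int) base => (PySem.Int.bor st.1 ((code.getD base 0) <<< st.2.toNat), st.2 + 2))
    (0, 0)
  let rv := (PySem.List.pyRange 0 st.2 2).foldl
    (fun rv i => PySem.Int.bor (rv <<< (2 : Nat)) (PySem.Int.bxor (PySem.Int.band (st.1 >>> i) 3) 1)) 0
  min st.1 rv

-- ===== PRECONDITION & SPEC =====
-- Pre_ excludes exactly the strings with a character that is not one of the four DNA bases,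
-- on which A's dict lookups raise KeyError.
def Pre_encodeKmer_py (kmer : String) : Prop :=
  kmer.toList.all (fun c => c ∈ (['A', 'T', 'C', 'G'] : List Char)) = true
instance (kmer : String) : Decidable (Pre_encodeKmer_py kmer) := by unfold Pre_encodeKmer_py; infer_instance

def pvWitness_encodeKmer_py : String := "GATTACA"

def Spec_encodeKmer_py (kmer : String) (out : Int) : Prop := out = encodeKmer_py_alt kmer
instance (kmer : String) (out : Int) : Decidable (Spec_encodeKmer_py kmer out) := by unfold Spec_encodeKmer_py; infer_instance

-- ===== CLAIM (what is proved, stated in full; the proofs are below) =====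
def Claim_equal_encodeKmer_py : Prop := ∀ (kmer : String), Dom_encodeKmer_py kmer → Pre_encodeKmer_py kmer → Spec_encodeKmer_py kmer (encodeKmer_py kmer)

-- ===== LEMMAS AND PROOFS =====

-- forward code of one base, as A's fw loop (and B's single table) computes it
def pvFwc (c : Char) : Int :=
  (PySem.Dict.ofList [('A', 0), ('T', 1), ('C', 2), ('G', 3)] : PySem.Dict Char Int).getD c 0

-- reverse code of one base, as A's rv loop computes it
def pvRvc (c : Char) : Int :=
  (PySem.Dict.ofList [('A', 1), ('T', 0), ('C', 3), ('G', 2)] : PySem.Dict Char Int).getD c 0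

-- base-4 value of a code list, most significant first (A's Horner loops)
def pvV (l : List Int) : Int := l.foldl (fun a c => 4 * a + c) 0

-- base-4 value of a code list, LEAST significant first (B's place-value accumulation)
def pvVr (l : List Int) : Int := l.foldr (fun c a => c + 4 * a) 0

lemma pv_step_bor (a c : Int) (ha : 0 ≤ a) (hc0 : 0 ≤ c) (hc : c < 4) :
    PySem.Int.bor (a <<< (2 : Nat)) c = 4 * a + c := by
  rw [Int.shiftLeft_eq, PySem.Int.bor_of_nonneg (by positivity) hc0]
  rw [show (a * 2 ^ (2:Nat)).toNat = a.toNat <<< 2 by rw [Nat.shiftLeft_eq]; omega]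
  rw [← Nat.shiftLeft_add_eq_or_of_lt (by norm_num; omega)]
  rw [Nat.shiftLeft_eq]; push_cast; omega

-- B's OR-at-place-value step: fw | (c << 2k) = fw + c * 4^k when fw fits in the low 2k bits
lemma pv_step_bor_place (a c : Int) (k : Nat) (ha0 : 0 ≤ a) (ha : a < 4 ^ k) (hc0 : 0 ≤ c) :
    PySem.Int.bor a (c <<< (2 * k)) = a + c * 4 ^ k := by
  have h4 : ((2 : Int)) ^ (2 * k) = 4 ^ k := by rw [pow_mul]; norm_num
  have h4n : ((2 : Nat)) ^ (2 * k) = 4 ^ k := by rw [pow_mul]; norm_num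
  rw [Int.shiftLeft_eq, PySem.Int.bor_of_nonneg ha0 (by positivity)]
  have hb : (c * 2 ^ (2 * k) : Int).toNat = c.toNat <<< (2 * k) := by
    rw [Nat.shiftLeft_eq]
    have : (c * 2 ^ (2 * k) : Int) = ((c.toNat * 2 ^ (2 * k) : Nat) : Int) := by
      push_cast; rw [Int.toNat_of_nonneg hc0]
    rw [this, Int.toNat_natCast]
  rw [hb, Nat.lor_comm]
  have halt : a.toNat < 2 ^ (2 * k) := by
    rw [h4n]
    have : a < ((4 ^ k : Nat) : Int) := by push_cast; exact ha
    omega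
  rw [← Nat.shiftLeft_add_eq_or_of_lt halt, Nat.shiftLeft_eq, h4n]
  push_cast
  rw [Int.toNat_of_nonneg hc0, Int.toNat_of_nonneg ha0, ← h4]
  push_cast [h4]
  ring

-- arithmetization of A's Horner loop shape (also used for B's rv loop)
lemma pv_foldl_bor {α : Type} (e : α → Int) (L : List α)
    (hb : ∀ x ∈ L, 0 ≤ e x ∧ e x < 4) :
    ∀ a : Int, 0 ≤ a →
      L.foldl (fun b x => PySem.Int.bor (b <<< (2 : Nat)) (e x)) a
        = L.foldl (fun b x => 4 * b + e x) a := by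
  induction L with
  | nil => intro a _; rfl
  | cons x L ih =>
    intro a ha
    obtain ⟨h0, h4⟩ := hb x (by simp)
    simp only [List.foldl_cons, pv_step_bor a (e x) ha h0 h4]
    exact ih (fun y hy => hb y (by simp [hy])) _ (by omega)

lemma pv_foldl_from (l : List Int) : ∀ a : Int,
    l.foldl (fun b c => 4 * b + c) a = a * 4 ^ l.length + pvV l := by
  induction l with
  | nil => intro a; simp [pvV]
  | cons c l ih =>
    intro a
    simp only [pvV, List.foldl_cons, List.length_cons]
    rw [ih, ih]
    ring

lemma pvV_bounds (l : List Int) (h : ∀ c ∈ l, 0 ≤ c ∧ c < 4) :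
    0 ≤ pvV l ∧ pvV l < 4 ^ l.length := by
  induction l with
  | nil => simp [pvV]
  | cons c l ih =>
    obtain ⟨h0, h4⟩ := h c (by simp)
    obtain ⟨ih0, ih4⟩ := ih (fun y hy => h y (by simp [hy]))
    have hc : pvV (c :: l) = c * 4 ^ l.length + pvV l := by
      simp only [pvV, List.foldl_cons]
      have := pv_foldl_from l (4 * 0 + c); simpa using this
    constructor
    · rw [hc]; positivity
    · rw [hc, List.length_cons, pow_succ]
      nlinarith [pow_pos (show (0:Int) < 4 by norm_num) l.length]

lemma pvVr_append (xs : List Int) (c : Int) :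
    pvVr (xs ++ [c]) = pvVr xs + c * 4 ^ xs.length := by
  induction xs with
  | nil => simp [pvVr]
  | cons x xs ih =>
    simp only [pvVr, List.foldr_cons, List.cons_append, List.length_cons] at *
    rw [ih]; ring

-- the LSB-first value of the reversed list is the MSB-first value of the list
lemma pvVr_reverse (l : List Int) : pvVr l.reverse = pvV l := by
  induction l with
  | nil => rfl
  | cons c t ih =>
    rw [List.reverse_cons, pvVr_append, ih, List.length_reverse]
    have h1 : pvV (c :: t) = c * 4 ^ t.length + pvV t := by
      simp only [pvV, List.foldl_cons]
      have := pv_foldl_from t (4 * 0 + c); simpa using this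
    rw [h1]; ring

-- invariant of B's back-to-front fw loop: state = (value of processed suffix, 2 * #processed)
lemma pv_fold_place (e : Char → Int) (m : List Char)
    (hb : ∀ c ∈ m, 0 ≤ e c ∧ e c < 4) :
    ∀ (a : Int) (k : Nat), 0 ≤ a → a < 4 ^ k →
      m.foldl (fun (st : Int × Int) c =>
          (PySem.Int.bor st.1 ((e c) <<< st.2.toNat), st.2 + 2)) (a, (2 * (k : Int)))
        = (a + 4 ^ k * pvVr (m.map e), 2 * ((k : Int) + m.length)) := by
  induction m with
  | nil => intro a k _ _; simp [pvVr]
  | cons c t ih =>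
    intro a k ha0 ha4
    obtain ⟨hc0, hc4⟩ := hb c (by simp)
    simp only [List.foldl_cons]
    have hsh : ((2 * (k : Int))).toNat = 2 * k := by omega
    rw [hsh, pv_step_bor_place a (e c) k ha0 ha4 hc0]
    have hst : (2 * (k : Int) + 2) = 2 * (((k + 1 : Nat)) : Int) := by push_cast; ring
    rw [hst, ih (fun y hy => hb y (by simp [hy])) (a + e c * 4 ^ k) (k + 1)
        (by positivity) (by rw [pow_succ]; nlinarith [pow_pos (show (0:Int) < 4 by norm_num) k])]
    have hval : a + e c * 4 ^ k + 4 ^ (k + 1) * pvVr (t.map e)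
        = a + 4 ^ k * pvVr ((c :: t).map e) := by
      simp only [List.map_cons, pvVr, List.foldr_cons]
      rw [pow_succ]; ring
    have hlen : 2 * (((k + 1 : Nat) : Int) + (t.length : Int))
        = 2 * ((k : Int) + ((c :: t).length : Int)) := by
      simp only [List.length_cons]; push_cast; ring
    rw [hval, hlen]

-- digit extraction: the i-th 2-bit group of pvV l (from the least end) is l.reverse[i]
lemma pv_extract (l : List Int) (h : ∀ c ∈ l, 0 ≤ c ∧ c < 4) :
    ∀ i : Nat, i < l.length → pvV l / 4 ^ i % 4 = l.reverse.getD i 0 := by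
  induction l using List.reverseRecOn with
  | nil => intro i hi; simp at hi
  | append_singleton l c ih =>
    intro i hi
    have hb : ∀ x ∈ l, 0 ≤ x ∧ x < 4 := fun y hy => h y (by simp [hy])
    obtain ⟨hc0, hc4⟩ := h c (by simp)
    obtain ⟨hV0, _⟩ := pvV_bounds l hb
    have hVa : pvV (l ++ [c]) = 4 * pvV l + c := by simp [pvV, List.foldl_append]
    rw [hVa]
    cases i with
    | zero => simp; omega
    | succ i =>
      have hi' : i < l.length := by simpa using hi
      have h4 : (4 * pvV l + c) / 4 ^ (i + 1) = pvV l / 4 ^ i := by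
        rw [pow_succ, mul_comm (4 ^ i) 4, ← Int.ediv_ediv_of_nonneg (by norm_num)]
        congr 1; omega
      rw [h4, ih hb i hi']
      simp [List.reverse_append]

lemma pv_band3 (a : Int) (h : 0 ≤ a) : PySem.Int.band a 3 = a % 4 := by
  rw [PySem.Int.band_of_nonneg h (by norm_num)]
  have h2 := Nat.and_two_pow_sub_one_eq_mod a.toNat 2
  norm_num at h2
  rw [show ((3:Int)).toNat = 3 from rfl, h2]
  omega

-- range(0, 2n, 2) enumerates the even shifts 2k, k < n
lemma pv_pyRange_even (n : Nat) :
    PySem.List.pyRange 0 (2 * (n : Int)) 2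
      = (List.range n).map (fun k : Nat => ((2 * k : Nat) : Int)) := by
  rw [PySem.List.pyRange_of_pos 0 (2 * (n : Int)) (by norm_num)]
  have hN : (if (0 : Int) < 2 * (n : Int) then (((2 * (n : Int)) - 0 + 2 - 1) / 2).toNat else 0)
      = n := by
    rcases Nat.eq_zero_or_pos n with h | h
    · simp [h]
    · rw [if_pos (by push_cast; omega)]
      omega
  rw [hN]
  refine List.map_congr_left ?_
  intro k _
  omega

-- ===== VERDICT (by name: the statement is the Claim_ definition above) =====
theorem encodeKmer_py_spec : Claim_equal_encodeKmer_py := by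
  intro kmer _ hpre0
  have hpre : ∀ c ∈ kmer.toList, c = 'A' ∨ c = 'T' ∨ c = 'C' ∨ c = 'G' := by
    intro c hc
    unfold Pre_encodeKmer_py at hpre0
    have := List.all_eq_true.1 hpre0 c hc
    simpa using this
  unfold Spec_encodeKmer_py encodeKmer_py encodeKmer_py_alt
  simp only [← pvFwc.eq_1, ← pvRvc.eq_1]
  have hfb : ∀ c ∈ kmer.toList, 0 ≤ pvFwc c ∧ pvFwc c < 4 := by
    intro c hc; rcases hpre c hc with rfl | rfl | rfl | rfl <;> exact ⟨by decide, by decide⟩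
  have hfb' : ∀ x ∈ kmer.toList.map pvFwc, 0 ≤ x ∧ x < 4 := by
    intro x hx; obtain ⟨c, hc, rfl⟩ := List.mem_map.1 hx; exact hfb c hc
  have hrb : ∀ c ∈ kmer.toList.reverse, 0 ≤ pvRvc c ∧ pvRvc c < 4 := by
    intro c hc
    rcases hpre c (List.mem_reverse.1 hc) with rfl | rfl | rfl | rfl <;> exact ⟨by decide, by decide⟩
  -- A's fw Horner loop computes pvV of the forward codes
  have hfw : kmer.toList.foldl (fun b c => PySem.Int.bor (b <<< (2 : Nat)) (pvFwc c)) 0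
      = pvV (kmer.toList.map pvFwc) := by
    rw [pv_foldl_bor pvFwc kmer.toList hfb 0 le_rfl]
    simp only [pvV, List.foldl_map]
  -- A's rv Horner loop computes pvV of the reversed-complement codes
  have hrvA : kmer.toList.reverse.foldl (fun b c => PySem.Int.bor (b <<< (2 : Nat)) (pvRvc c)) 0
      = pvV (kmer.toList.reverse.map pvRvc) := by
    rw [pv_foldl_bor pvRvc kmer.toList.reverse hrb 0 le_rfl]
    simp only [pvV, List.foldl_map]
  -- B's back-to-front place-value loop computes the same fw (and shift = 2n)
  have hfbr : ∀ c ∈ kmer.toList.reverse, 0 ≤ pvFwc c ∧ pvFwc c < 4 := by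
    intro c hc; exact hfb c (List.mem_reverse.1 hc)
  have hB := pv_fold_place pvFwc kmer.toList.reverse hfbr 0 0 le_rfl (by norm_num)
  rw [show ((2 : Int) * ((0 : Nat) : Int)) = 0 from by norm_num] at hB
  rw [show ((0 : Int) + 4 ^ 0 * pvVr (kmer.toList.reverse.map pvFwc))
        = pvV (kmer.toList.map pvFwc) from by
      rw [List.map_reverse, pvVr_reverse]; ring] at hB
  rw [hB, hfw, hrvA]
  obtain ⟨hV0, -⟩ := pvV_bounds (kmer.toList.map pvFwc) hfb'
  -- the extracted-and-complemented group k is the reverse code of the k-th base from the end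
  have hE : ∀ (k : Nat) (hk : k < kmer.toList.length),
      PySem.Int.bxor (PySem.Int.band
          (pvV (kmer.toList.map pvFwc) >>> (((2 * k : Nat) : Int))) 3) 1
        = pvRvc (kmer.toList.reverse[k]'(by simpa using hk)) := by
    intro k hk
    rw [Int.shiftRight_natCast_right, Int.shiftRight_eq_div_pow]
    rw [show (((2:Nat) ^ (2 * k) : Nat) : Int) = 4 ^ k by push_cast; rw [pow_mul]; norm_num]
    rw [pv_band3 _ (Int.ediv_nonneg hV0 (by positivity))]
    rw [pv_extract (kmer.toList.map pvFwc) hfb' k (by simpa using hk)]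
    rw [← List.map_reverse]
    have hk' : k < kmer.toList.reverse.length := by simpa using hk
    rw [List.getD_eq_getElem _ _ (by simpa using hk'), List.getElem_map]
    have hc : kmer.toList.reverse[k] ∈ kmer.toList :=
      List.mem_reverse.1 (List.getElem_mem hk')
    rcases hpre _ hc with h | h | h | h <;> rw [h] <;> decide
  -- B's rv loop: range(0, 2n, 2) → List.range n, normalise the shift amount
  rw [show (2 * (((0 : Nat) : Int) + (kmer.toList.reverse.length : Int)))
        = 2 * ((kmer.toList.length : Nat) : Int) from by push_cast; simp]
  rw [pv_pyRange_even kmer.toList.length, List.foldl_map]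
  have hEb : ∀ k ∈ List.range kmer.toList.length,
      0 ≤ (fun k : Nat => PySem.Int.bxor (PySem.Int.band
            (pvV (kmer.toList.map pvFwc) >>> (((2 * k : Nat) : Int))) 3) 1) k
      ∧ (fun k : Nat => PySem.Int.bxor (PySem.Int.band
            (pvV (kmer.toList.map pvFwc) >>> (((2 * k : Nat) : Int))) 3) 1) k < 4 := by
    intro k hk
    have hk' : k < kmer.toList.length := List.mem_range.1 hk
    simp only [hE k hk']
    have hc : kmer.toList.reverse[k]'(by simpa using hk') ∈ kmer.toList :=
      List.mem_reverse.1 (List.getElem_mem (by simpa using hk'))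
    rcases hpre _ hc with h | h | h | h <;> rw [h] <;> exact ⟨by decide, by decide⟩
  rw [pv_foldl_bor (fun k : Nat => PySem.Int.bxor (PySem.Int.band
        (pvV (kmer.toList.map pvFwc) >>> (((2 * k : Nat) : Int))) 3) 1)
      (List.range kmer.toList.length) hEb 0 le_rfl]
  have hlist : (List.range kmer.toList.length).map (fun k : Nat => PySem.Int.bxor (PySem.Int.band
        (pvV (kmer.toList.map pvFwc) >>> (((2 * k : Nat) : Int))) 3) 1)
      = kmer.toList.reverse.map pvRvc := by
    apply List.ext_getElem (by simp)
    intro k h1 h2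
    simp only [List.getElem_map, List.getElem_range]
    exact hE k (by simpa using h1)
  have hrvB : (List.range kmer.toList.length).foldl (fun b k => 4 * b +
        PySem.Int.bxor (PySem.Int.band
          (pvV (kmer.toList.map pvFwc) >>> (((2 * k : Nat) : Int))) 3) 1) 0
      = pvV (kmer.toList.reverse.map pvRvc) := by
    rw [← hlist]
    simp only [pvV, List.foldl_map]
  rw [hrvB, min_def]
  split_ifs <;> omega
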